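-- pv_equiv track=rewrite | github.com/akhandsingh17/assignments | leetcode/LeetCode233.py | LeetCode233
-- ===== SOURCE A (Python) =====
-- def CheckOnes(n):
--
--     while n!=0:
--         rem=n%10
--         if rem==1:
--             return True
--         n=n//10
--     return False
--
-- def LeetCode233(num):
--
--     n=1
--     lst=[]
--     while n<=num:
--         lst.append(n)
--         n=n+1
--     fnl_lst=[]
--     for n in lst:
--         flg=CheckOnes(n)
--         if flg==True:
--             fnl_lst.append(n)
--     return fnl_lst
-- ===== SOURCE B (Python) =====
-- def LeetCode233(num):
--     # Build the complement set (numbers with NO digit 1) by digit-tree generation,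
--     # then emit 1..num skipping members of that set.
--     no_one = set()
--
--     def gen(m):
--         for d in (0, 2, 3, 4, 5, 6, 7, 8, 9):
--             c = 10 * m + d
--             if 0 < c <= num:
--                 no_one.add(c)
--                 gen(c)
--
--     gen(0)
--     return [n for n in range(1, num + 1) if n not in no_one]
-- ===== Notes on version B (the rewrite author's own statement) =====
-- stated objective: alternative
-- what changed: Instead of testing every number with a per-number digit-extraction loop, B generates the complement (the numbers up to num containing no digit one) once via a recursive digit tree, then emits the range skipping members of that set, so the per-number digit loop disappears.
import Mathlib
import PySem

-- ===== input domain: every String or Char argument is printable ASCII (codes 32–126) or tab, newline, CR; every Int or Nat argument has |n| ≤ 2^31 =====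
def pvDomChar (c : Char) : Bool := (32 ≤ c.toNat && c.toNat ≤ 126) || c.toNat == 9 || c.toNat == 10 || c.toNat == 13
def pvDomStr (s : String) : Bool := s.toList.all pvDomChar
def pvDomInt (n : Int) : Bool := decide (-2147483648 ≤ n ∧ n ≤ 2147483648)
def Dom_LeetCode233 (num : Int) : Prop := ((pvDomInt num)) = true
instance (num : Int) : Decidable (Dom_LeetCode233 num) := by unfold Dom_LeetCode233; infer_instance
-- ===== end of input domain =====

-- B replaces A's scan-and-test (a digit-extraction loop per number) by generating the
-- COMPLEMENT — the set of numbers without any digit 1 — via a recursive digit tree,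
-- then emitting 1..num skipping that set (objective: alternative, same asymptotic cost).

-- ===== PORT A =====
-- CheckOnes: transliteration of the digit while loop; the Nat fuel is only a totality
-- guard (n.toNat strictly decreases each iteration, so the fuel is never exhausted),
-- and 'n ≤ 0' merges the 'n == 0 → False' exit with a guard for the (unreached in A)
-- negative case.
def checkOnesGo : Nat → Int → Bool
  | 0, _ => false
  | fuel + 1, n =>
    if n ≤ 0 then false
    else if PySem.Int.mod n 10 = 1 then true
    else checkOnesGo fuel (PySem.Int.floordiv n 10)

def CheckOnes (n : Int) : Bool := checkOnesGo (n.toNat + 1) n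

-- the first while loop of A (lst.append(n); n = n + 1); fuel = number of iterations left
def buildGo : Nat → Int → Int → List Int → List Int
  | 0, _, _, lst => lst
  | fuel + 1, n, num, lst => if n ≤ num then buildGo fuel (n + 1) num (lst ++ [n]) else lst

def LeetCode233 (num : Int) : List Int :=
  let lst := buildGo (num + 1 - 1).toNat 1 num []
  lst.foldl (fun fnl n => if CheckOnes n = true then fnl ++ [n] else fnl) []

-- ===== PORT B =====
-- gen(m): for d in (0,2,3,4,5,6,7,8,9): c = 10*m+d; if 0 < c <= num: add c, recurse.
-- The Nat fuel is only a totality guard: each recursive level strictly increases m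
-- (children are ≥ m+1), so fuel (num.toNat + 2) is never exhausted.
mutual
def genGo (num : Int) : Nat → Int → PySem.Set Int → PySem.Set Int
  | 0, _, s => s
  | f + 1, m, s => genLoop num f m [0, 2, 3, 4, 5, 6, 7, 8, 9] s

def genLoop (num : Int) (f : Nat) (m : Int) : List Int → PySem.Set Int → PySem.Set Int
  | [], s => s
  | d :: ds, s =>
    if 0 < 10 * m + d ∧ 10 * m + d ≤ num then
      genLoop num f m ds (genGo num f (10 * m + d) (PySem.Set.add s (10 * m + d)))
    else genLoop num f m ds s
end

def LeetCode233_alt (num : Int) : List Int :=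
  let noOne := genGo num (num.toNat + 2) 0 PySem.Set.empty
  (PySem.List.pyRange 1 (num + 1) 1).filter (fun n => !(PySem.Set.contains noOne n))

-- ===== PRECONDITION & SPEC =====
def Spec_LeetCode233 (num : Int) (out : List Int) : Prop := out = LeetCode233_alt num
instance (num : Int) (out : List Int) : Decidable (Spec_LeetCode233 num out) := by unfold Spec_LeetCode233; infer_instance

-- ===== CLAIM (what is proved, stated in full; the proofs are below) =====
def Claim_equal_LeetCode233 : Prop := ∀ (num : Int), Dom_LeetCode233 num → Spec_LeetCode233 num (LeetCode233 num)

-- ===== LEMMAS AND PROOFS =====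

-- the accumulator loop produces lst ++ [n, n+1, …, num] whenever it has enough fuel
theorem buildGo_eq (fuel : Nat) (n num : Int) (lst : List Int)
    (hf : (num + 1 - n).toNat ≤ fuel) :
    buildGo fuel n num lst = lst ++ PySem.List.pyRange n (num + 1) 1 := by
  induction fuel generalizing n lst with
  | zero =>
    have h : ¬ n < num + 1 := by omega
    simp [buildGo, PySem.List.pyRange_of_pos _ _ (by norm_num : (0:Int) < 1), h]
  | succ f ih =>
    by_cases h : n ≤ num
    · rw [buildGo, if_pos h, ih (n + 1) (lst ++ [n]) (by omega),
        PySem.List.pyRange_one_cons (by omega : n < num + 1)]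
      simp
    · have h' : ¬ n < num + 1 := by omega
      simp [buildGo, h, PySem.List.pyRange_of_pos _ _ (by norm_num : (0:Int) < 1), h']

-- Python's digit-loop test, on Nat (fuel-irrelevant once fuel > m)
def hasOneNatGo : Nat → Nat → Bool
  | 0, _ => false
  | fuel + 1, m => if m = 0 then false else (m % 10 == 1) || hasOneNatGo fuel (m / 10)

def hasOneNat (m : Nat) : Bool := hasOneNatGo (m + 1) m

theorem hasOneNatGo_fuel (f f' m : Nat) (h : m < f) (h' : m < f') :
    hasOneNatGo f m = hasOneNatGo f' m := by
  induction f generalizing f' m with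
  | zero => omega
  | succ g ih =>
    cases f' with
    | zero => omega
    | succ g' =>
      by_cases hm : m = 0
      · simp [hasOneNatGo, hm]
      · have hd : m / 10 < m := Nat.div_lt_self (by omega) (by norm_num)
        rw [hasOneNatGo, hasOneNatGo, if_neg hm, if_neg hm, ih g' (m / 10) (by omega) (by omega)]

theorem hasOneNat_unfold (m : Nat) :
    hasOneNat m = if m = 0 then false else ((m % 10 == 1) || hasOneNat (m / 10)) := by
  by_cases hm : m = 0
  · simp [hasOneNat, hasOneNatGo, hm]
  · have hd : m / 10 < m := Nat.div_lt_self (by omega) (by norm_num)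
    rw [hasOneNat, hasOneNatGo, if_neg hm, if_neg hm,
      hasOneNatGo_fuel m (m / 10 + 1) (m / 10) (by omega) (by omega)]
    rfl

theorem checkOnesGo_eq (fuel : Nat) (n : Int) (hf : n.toNat < fuel) :
    checkOnesGo fuel n = hasOneNat n.toNat := by
  induction fuel generalizing n with
  | zero => omega
  | succ f ih =>
    rw [checkOnesGo, hasOneNat_unfold]
    by_cases h : n ≤ 0
    · rw [if_pos h, if_pos (show n.toNat = 0 by omega)]
    · rw [if_neg h, if_neg (show ¬ n.toNat = 0 by omega)]
      have hm : PySem.Int.mod n 10 = ((n.toNat % 10 : Nat) : Int) := by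
        simp only [PySem.Int.mod, Int.fmod_eq_emod]
        omega
      have hd : PySem.Int.floordiv n 10 = ((n.toNat / 10 : Nat) : Int) := by
        simp only [PySem.Int.floordiv, Int.fdiv_eq_ediv_of_nonneg _ (by norm_num : (0:Int) ≤ 10)]
        omega
      by_cases h1 : n.toNat % 10 = 1
      · rw [if_pos (by rw [hm, h1]; norm_num)]
        simp [h1]
      · rw [if_neg (by rw [hm]; intro e; exact h1 (by exact_mod_cast e))]
        rw [hd, ih ((n.toNat / 10 : Nat) : Int) (by simp; omega), Int.toNat_natCast]
        simp [h1]

-- hasOneNat tests "some decimal digit equals 1"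
theorem hasOneNat_iff (x : Nat) : hasOneNat x = true ↔ ∃ j, (x / 10 ^ j) % 10 = 1 := by
  induction x using Nat.strong_induction_on with
  | _ x ih =>
    rw [hasOneNat_unfold]
    by_cases h0 : x = 0
    · subst h0
      simp [Nat.zero_div]
    · rw [if_neg h0]
      simp only [Bool.or_eq_true, beq_iff_eq]
      rw [ih (x / 10) (Nat.div_lt_self (by omega) (by norm_num))]
      constructor
      · rintro (h | ⟨j, hj⟩)
        · exact ⟨0, by simpa using h⟩
        · refine ⟨j + 1, ?_⟩
          rw [pow_succ', ← Nat.div_div_eq_div_mul]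
          exact hj
      · rintro ⟨j, hj⟩
        cases j with
        | zero => exact Or.inl (by simpa using hj)
        | succ j =>
          refine Or.inr ⟨j, ?_⟩
          rw [Nat.div_div_eq_div_mul, ← pow_succ']
          exact hj

-- "x is a strict descendant of m in the digit tree, appending only non-1 digits"
def ExtN (m x : Nat) : Prop := ∃ k, 0 < k ∧ x / 10 ^ k = m ∧ ∀ j < k, (x / 10 ^ j) % 10 ≠ 1

theorem ExtN_le {m x : Nat} (h : ExtN m x) : m ≤ x := by
  obtain ⟨k, _, hdiv, _⟩ := h
  exact hdiv ▸ Nat.div_le_self _ _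

theorem extStep_fwd (m x : Nat) :
    ∀ k, 0 < k → x / 10 ^ k = m → (∀ j < k, (x / 10 ^ j) % 10 ≠ 1) →
    ∃ d, d < 10 ∧ d ≠ 1 ∧ (x = 10 * m + d ∨ (0 < 10 * m + d ∧ ExtN (10 * m + d) x)) := by
  intro k
  induction k using Nat.strong_induction_on with
  | _ k ih =>
    intro hk hdiv hdig
    match k, hk with
    | 1, _ =>
      refine ⟨x % 10, Nat.mod_lt _ (by norm_num), by simpa using hdig 0 (by norm_num), Or.inl ?_⟩
      rw [← hdiv]
      simp [pow_one]
      omega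
    | k' + 2, _ =>
      have hcm : (x / 10 ^ (k' + 1)) / 10 = m := by
        rw [Nat.div_div_eq_div_mul, ← pow_succ, hdiv]
      have hcd : x / 10 ^ (k' + 1) = 10 * m + (x / 10 ^ (k' + 1)) % 10 := by omega
      by_cases hc0 : x / 10 ^ (k' + 1) = 0
      · -- leading zeros: shrink the witness
        have hm0 : m = 0 := by omega
        exact ih (k' + 1) (by omega) (by omega) (by rw [hm0]; exact hc0)
          (fun j hj => hdig j (by omega))
      · refine ⟨(x / 10 ^ (k' + 1)) % 10, Nat.mod_lt _ (by norm_num), hdig (k' + 1) (by omega),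
          Or.inr ⟨by omega, ?_⟩⟩
        rw [← hcd]
        exact ⟨k' + 1, by omega, rfl, fun j hj => hdig j (by omega)⟩

theorem extStep_bwd (m x d : Nat) (hd10 : d < 10) (hd1 : d ≠ 1)
    (h : x = 10 * m + d ∨ ExtN (10 * m + d) x) : ExtN m x := by
  rcases h with h | ⟨k, hk, hdiv, hdig⟩
  · refine ⟨1, by norm_num, ?_, ?_⟩
    · rw [pow_one]; omega
    · intro j hj
      interval_cases j
      simpa [pow_zero] using show x % 10 ≠ 1 by omega
  · refine ⟨k + 1, by omega, ?_, ?_⟩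
    · rw [pow_succ, ← Nat.div_div_eq_div_mul, hdiv]
      omega
    · intro j hj
      rcases Nat.lt_or_ge j k with h' | h'
      · exact hdig j h'
      · have hjk : j = k := by omega
        subst hjk
        rw [hdiv]
        omega

theorem extTop (x : Nat) (hx : 0 < x) : ExtN 0 x ↔ hasOneNat x = false := by
  rw [← Bool.not_eq_true, hasOneNat_iff]
  constructor
  · rintro ⟨k, hk, hdiv, hdig⟩ ⟨j, hj⟩
    rcases Nat.lt_or_ge j k with h' | h'
    · exact hdig j h' hj
    · have hsplit : x / 10 ^ j = (x / 10 ^ k) / 10 ^ (j - k) := by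
        rw [Nat.div_div_eq_div_mul, ← pow_add]
        congr 2
        omega
      rw [hsplit, hdiv] at hj
      simp at hj
  · intro h
    refine ⟨x + 1, by omega, ?_, fun j hj hd => h ⟨j, hd⟩⟩
    have hlt : x < 10 ^ (x + 1) :=
      lt_of_lt_of_le (lt_of_lt_of_le Nat.lt_two_pow_self (Nat.pow_le_pow_right (by norm_num) (by omega)))
        (Nat.pow_le_pow_left (by norm_num) _)
    exact Nat.div_eq_of_lt hlt

theorem mem_digitList (d : Int) :
    d ∈ ([0, 2, 3, 4, 5, 6, 7, 8, 9] : List Int) ↔ 0 ≤ d ∧ d < 10 ∧ d ≠ 1 := by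
  constructor
  · intro h
    fin_cases h <;> norm_num
  · rintro ⟨h0, h10, h1⟩
    interval_cases d <;> simp_all

theorem genLoop_mem (num : Int) (f : Nat) (m : Int)
    (IH : ∀ (m' : Int) (s : PySem.Set Int) (x : Int), 0 ≤ m' → (num + 1 - m').toNat < f →
      (x ∈ genGo num f m' s ↔ x ∈ s ∨ (0 < x ∧ x ≤ num ∧ ExtN m'.toNat x.toNat)))
    (hm : 0 ≤ m) (hf : (num + 1 - m).toNat < f + 1) :
    ∀ (ds : List Int), (∀ d ∈ ds, 0 ≤ d) →
      ∀ (s : PySem.Set Int) (x : Int),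
      x ∈ genLoop num f m ds s ↔
        x ∈ s ∨ ∃ d ∈ ds, 0 < 10 * m + d ∧ 10 * m + d ≤ num ∧
          (x = 10 * m + d ∨ (0 < x ∧ x ≤ num ∧ ExtN (10 * m + d).toNat x.toNat)) := by
  intro ds
  induction ds with
  | nil => intro _; simp [genLoop]
  | cons d ds ihds =>
    intro hds s x
    have hd0 : 0 ≤ d := hds d (List.mem_cons_self ..)
    have hds' : ∀ d' ∈ ds, 0 ≤ d' := fun d' hd' => hds d' (List.mem_cons_of_mem _ hd')
    rw [genLoop]
    by_cases hc : 0 < 10 * m + d ∧ 10 * m + d ≤ num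
    · rw [if_pos hc, ihds hds',
        IH (10 * m + d) (PySem.Set.add s (10 * m + d)) x (by omega) (by omega),
        PySem.Set.mem_add]
      simp only [List.mem_cons]
      constructor
      · rintro (((hs | he) | hrec) | hrest)
        · exact Or.inl hs
        · exact Or.inr ⟨d, Or.inl rfl, hc.1, hc.2, Or.inl he⟩
        · exact Or.inr ⟨d, Or.inl rfl, hc.1, hc.2, Or.inr hrec⟩
        · obtain ⟨d', hd', hrest'⟩ := hrest
          exact Or.inr ⟨d', Or.inr hd', hrest'⟩
      · rintro (hs | ⟨d', hd' | hd', h1, h2, h3⟩)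
        · exact Or.inl (Or.inl (Or.inl hs))
        · subst hd'
          rcases h3 with h3 | h3
          · exact Or.inl (Or.inl (Or.inr h3))
          · exact Or.inl (Or.inr h3)
        · exact Or.inr ⟨d', hd', h1, h2, h3⟩
    · rw [if_neg hc, ihds hds']
      simp only [List.mem_cons]
      constructor
      · rintro (hs | ⟨d', hd', hrest⟩)
        · exact Or.inl hs
        · exact Or.inr ⟨d', Or.inr hd', hrest⟩
      · rintro (hs | ⟨d', hd' | hd', h1, h2, h3⟩)
        · exact Or.inl hs
        · exact absurd ⟨hd' ▸ h1, hd' ▸ h2⟩ hc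
        · exact Or.inr ⟨d', hd', h1, h2, h3⟩

theorem genGo_mem (num : Int) : ∀ (f : Nat) (m : Int) (s : PySem.Set Int) (x : Int),
    0 ≤ m → (num + 1 - m).toNat < f →
    (x ∈ genGo num f m s ↔ x ∈ s ∨ (0 < x ∧ x ≤ num ∧ ExtN m.toNat x.toNat)) := by
  intro f
  induction f with
  | zero => intro m s x hm hf; omega
  | succ f ih =>
    intro m s x hm hf
    rw [genGo, genLoop_mem num f m ih hm hf _ (by decide)]
    constructor
    · rintro (hs | ⟨d, hd, hc1, hc2, hx⟩)
      · exact Or.inl hs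
      · obtain ⟨hd0, hd10, hd1⟩ := (mem_digitList d).mp hd
        have hna : (10 * m + d).toNat = 10 * m.toNat + d.toNat := by omega
        rcases hx with hx | ⟨hx1, hx2, hx3⟩
        · refine Or.inr ⟨by omega, by omega, ?_⟩
          apply extStep_bwd m.toNat x.toNat d.toNat (by omega) (by omega)
          exact Or.inl (by omega)
        · refine Or.inr ⟨hx1, hx2, ?_⟩
          apply extStep_bwd m.toNat x.toNat d.toNat (by omega) (by omega)
          exact Or.inr (by rw [← hna]; exact hx3)
    · rintro (hs | ⟨hx1, hx2, ⟨k, hk, hdiv, hdig⟩⟩)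
      · exact Or.inl hs
      · obtain ⟨d, hd10, hd1, hcase⟩ := extStep_fwd m.toNat x.toNat k hk hdiv hdig
        refine Or.inr ⟨(d : Int), (mem_digitList _).mpr ⟨by omega, by omega, by omega⟩, ?_⟩
        have hna : 10 * m + (d : Int) = ((10 * m.toNat + d : Nat) : Int) := by push_cast; omega
        rcases hcase with hcase | ⟨hpos, hext⟩
        · exact ⟨by omega, by omega, Or.inl (by omega)⟩
        · have hle : (10 * m.toNat + d : Nat) ≤ x.toNat := ExtN_le hext
          refine ⟨by omega, by omega, Or.inr ⟨hx1, hx2, ?_⟩⟩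
          have : (10 * m + (d : Int)).toNat = 10 * m.toNat + d := by omega
          rw [this]
          exact hext

-- ===== VERDICT (by name: the statement is the Claim_ definition above) =====
theorem LeetCode233_spec : Claim_equal_LeetCode233 := by
  intro num _
  show LeetCode233 num = LeetCode233_alt num
  unfold LeetCode233 LeetCode233_alt
  rw [buildGo_eq (num + 1 - 1).toNat 1 num [] (by omega), List.nil_append]
  rw [show (fun fnl n => if CheckOnes n = true then fnl ++ [n] else fnl)
        = (fun (acc : List Int) (x : Int) => if CheckOnes x = true then acc ++ [id x] else acc) from rfl,
    PySem.List.foldl_append_if]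
  rw [List.map_id, List.nil_append]
  apply List.filter_congr
  intro n hn
  obtain ⟨h1, h2⟩ := (PySem.List.mem_pyRange_iff_of_pos (by norm_num) n).mp hn
  have hC : CheckOnes n = hasOneNat n.toNat :=
    checkOnesGo_eq (n.toNat + 1) n (by omega)
  have hmem : n ∈ genGo num (num.toNat + 2) 0 PySem.Set.empty ↔ hasOneNat n.toNat = false := by
    rw [genGo_mem num (num.toNat + 2) 0 PySem.Set.empty n (by omega) (by omega)]
    have h0 : (0 : Int).toNat = 0 := rfl
    rw [h0]
    constructor
    · rintro (hs | ⟨_, _, hext⟩)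
      · simp [PySem.Set.empty] at hs
      · exact (extTop n.toNat (by omega)).mp hext
    · intro h
      exact Or.inr ⟨by omega, by omega, (extTop n.toNat (by omega)).mpr h⟩
  rw [hC]
  cases hb : hasOneNat n.toNat with
  | false =>
    have hin : n ∈ genGo num (num.toNat + 2) 0 PySem.Set.empty := hmem.mpr hb
    rw [(PySem.Set.contains_iff _ _).mpr hin]
    rfl
  | true =>
    have hnin : PySem.Set.contains (genGo num (num.toNat + 2) 0 PySem.Set.empty) n ≠ true := by
      intro hc
      have := hmem.mp ((PySem.Set.contains_iff _ _).mp hc)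
      rw [this] at hb
      cases hb
    rw [Bool.eq_false_iff.mpr hnin]
    rfl
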